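-- pv_equiv track=rewrite | github.com/GF1977/AOC2023 | Day 09/day09.py | get_coeff
-- ===== SOURCE A (Python) =====
-- def get_coeff(seq_len: int) -> list[int]:
--     if seq_len == 1:
--         return [1]
--     else:
--         prev = get_coeff(seq_len - 1)
--         return (
--             [prev[0] + 0]
--             + [
--                 (-1) ** (i) * (abs(prev[i - 1]) + abs(prev[i]))
--                 for i in range(1, len(prev))
--             ]
--             + [0 + abs(prev[-1])]
--         )
-- ===== SOURCE B (Python) =====
-- def get_coeff(seq_len: int) -> list[int]:
--     # One pass: multiplicative binomial recurrence C(n,i+1) = C(n,i)*(n-i)//(i+1),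
--     # with alternating signs; the final coefficient C(n,n) = 1 is appended unsigned.
--     n = seq_len - 1
--     row = []
--     c = 1
--     for i in range(n):
--         row.append(c if i % 2 == 0 else -c)
--         c = c * (n - i) // (i + 1)
--     row.append(c)
--     return row
-- ===== Notes on version B (the rewrite author's own statement) =====
-- stated objective: faster
-- what changed: Replaces the O(n^2) recursive row-by-row construction with a single O(n) pass using the multiplicative binomial recurrence C(n,i+1)=C(n,i)*(n-i)//(i+1) and alternating signs.
-- outside the precondition, e.g. on get_coeff(0): A raises RecursionError, B returns [1]
import Mathlib
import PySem

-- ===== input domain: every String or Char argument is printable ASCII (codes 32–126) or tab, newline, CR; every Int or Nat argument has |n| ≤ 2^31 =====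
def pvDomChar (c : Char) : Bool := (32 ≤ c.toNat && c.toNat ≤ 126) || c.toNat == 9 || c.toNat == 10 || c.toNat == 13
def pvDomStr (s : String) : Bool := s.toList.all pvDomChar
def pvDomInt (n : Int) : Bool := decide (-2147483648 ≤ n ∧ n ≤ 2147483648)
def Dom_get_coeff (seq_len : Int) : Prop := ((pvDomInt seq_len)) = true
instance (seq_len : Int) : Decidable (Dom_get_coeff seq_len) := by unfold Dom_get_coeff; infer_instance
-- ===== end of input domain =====

-- B replaces A's O(n^2) recursive construction by one multiplicative-recurrence pass (O(n)).

-- ===== PORT A =====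
def get_coeff (seq_len : Int) : List Int :=
  if seq_len = 1 then [1]
  else if seq_len < 1 then []   -- totality guard: Python recurses forever here (excluded by Pre_)
  else
    let prev := get_coeff (seq_len - 1)
    [PySem.List.pyGetD prev 0 0 + 0]
      ++ (PySem.List.pyRange 1 (prev.length : Int) 1).map
           (fun i => (-1 : Int) ^ i.toNat *
             (|PySem.List.pyGetD prev (i - 1) 0| + |PySem.List.pyGetD prev i 0|))
      ++ [0 + |PySem.List.pyGetD prev (-1) 0|]
termination_by seq_len.toNat
decreasing_by omega

-- ===== PORT B =====
def get_coeff_alt (seq_len : Int) : List Int :=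
  let n := seq_len - 1
  let st := (PySem.List.pyRange 0 n 1).foldl
    (fun (st : List Int × Int) i =>
      (st.1 ++ [if PySem.Int.mod i 2 = 0 then st.2 else -st.2],
       PySem.Int.floordiv (st.2 * (n - i)) (i + 1)))
    ([], 1)
  st.1 ++ [st.2]

-- ===== PRECONDITION & SPEC =====
-- Pre_ excludes seq_len ≤ 0, where Python's A never returns (unbounded recursion → RecursionError);
-- nothing is excluded on which A returns.
def Pre_get_coeff (seq_len : Int) : Prop := 1 ≤ seq_len
instance (seq_len : Int) : Decidable (Pre_get_coeff seq_len) := by unfold Pre_get_coeff; infer_instance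
def pvWitness_get_coeff : Int := (5)

def Spec_get_coeff (seq_len : Int) (out : List Int) : Prop := out = get_coeff_alt seq_len
instance (seq_len : Int) (out : List Int) : Decidable (Spec_get_coeff seq_len out) := by unfold Spec_get_coeff; infer_instance

-- ===== CLAIM (what is proved, stated in full; the proofs are below) =====
def Claim_equal_get_coeff : Prop := ∀ (seq_len : Int), Dom_get_coeff seq_len → Pre_get_coeff seq_len → Spec_get_coeff seq_len (get_coeff seq_len)

-- ===== LEMMAS AND PROOFS =====

-- Both programs compute: the alternating-sign binomial row with an unsigned final 1.
def pvRow (m : Nat) : List Int :=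
  ((List.range m).map fun i => (-1 : Int) ^ i * (m.choose i : Int)) ++ [1]

theorem pvRow_length (m : Nat) : (pvRow m).length = m + 1 := by
  simp [pvRow]

theorem pvRow_getD_zero (m : Nat) : (pvRow m).getD 0 0 = 1 := by
  cases m with
  | zero => simp [pvRow]
  | succ k => simp [pvRow, List.range_succ_eq_map]

theorem pvRow_abs (m j : Nat) (h : j ≤ m) : |(pvRow m).getD j 0| = (m.choose j : Int) := by
  rcases Nat.lt_or_ge j m with hj | hj
  · have hlen : j < ((List.range m).map fun i => (-1 : Int) ^ i * (m.choose i : Int)).length := by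
      simpa using hj
    rw [pvRow, List.getD_eq_getElem?_getD, List.getElem?_append_left hlen]
    simp [abs_mul, abs_pow, hj]
  · have hjm : j = m := le_antisymm h hj
    subst hjm
    have hlen : ((List.range j).map fun i => (-1 : Int) ^ i * (j.choose i : Int)).length = j := by
      simp
    rw [pvRow, List.getD_eq_getElem?_getD]
    rw [show j = ((List.range j).map fun i => (-1 : Int) ^ i * (j.choose i : Int)).length from hlen.symm]
    simp

theorem alt_fold (m : Nat) : ∀ k : Nat, k ≤ m → ∀ row : List Int,
    (PySem.List.pyRange (k : Int) (m : Int) 1).foldl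
      (fun (st : List Int × Int) i =>
        (st.1 ++ [if PySem.Int.mod i 2 = 0 then st.2 else -st.2],
         PySem.Int.floordiv (st.2 * ((m : Int) - i)) (i + 1)))
      (row, (m.choose k : Int))
    = (row ++ (List.range' k (m - k)).map (fun i => (-1 : Int) ^ i * (m.choose i : Int)),
       (m.choose m : Int)) := by
  intro k
  induction hd : m - k generalizing k with
  | zero =>
    intro hk row
    have hkm : k = m := by omega
    subst hkm
    rw [PySem.List.pyRange_one_eq_nil (le_refl _)]
    simp
  | succ d ih =>
    intro hk row
    have hklt : (k : Int) < (m : Int) := by exact_mod_cast (by omega : k < m)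
    rw [PySem.List.pyRange_one_cons hklt]
    simp only [List.foldl_cons]
    have hsign : (if PySem.Int.mod (k : Int) 2 = 0 then (m.choose k : Int) else -(m.choose k : Int))
        = (-1 : Int) ^ k * (m.choose k : Int) := by
      have : PySem.Int.mod (k : Int) 2 = ((k % 2 : Nat) : Int) := by
        exact_mod_cast PySem.Int.mod_natCast k 2
      rw [this]
      rcases Nat.even_or_odd k with he | ho
      · simp [Nat.even_iff.mp he, he.neg_one_pow]
      · have h1 : k % 2 = 1 := Nat.odd_iff.mp ho
        simp [h1, ho.neg_one_pow]
    have hdiv : PySem.Int.floordiv ((m.choose k : Int) * ((m : Int) - (k : Int))) ((k : Int) + 1)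
        = (m.choose (k + 1) : Int) := by
      have hsub : (m : Int) - (k : Int) = ((m - k : Nat) : Int) := by omega
      have hmul : (m.choose k : Int) * ((m : Int) - (k : Int)) = ((m.choose k * (m - k) : Nat) : Int) := by
        rw [hsub]; push_cast; ring
      have hcast : ((k : Int) + 1) = ((k + 1 : Nat) : Int) := by push_cast; ring
      rw [hmul, hcast, PySem.Int.floordiv_natCast]
      congr 1
      rw [← Nat.choose_succ_right_eq]
      exact Nat.mul_div_cancel _ (Nat.succ_pos k)
    simp only [hsign, hdiv]
    rw [show ((k : Int) + 1) = ((k + 1 : Nat) : Int) from by push_cast; ring]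
    rw [ih (k + 1) (by omega) (by omega)]
    rw [List.range'_succ]
    simp [List.append_assoc]

theorem alt_eq (m : Nat) : get_coeff_alt ((m : Int) + 1) = pvRow m := by
  unfold get_coeff_alt
  simp only [add_sub_cancel_right]
  have h := alt_fold m 0 (Nat.zero_le m) []
  simp only [Nat.cast_zero, Nat.choose_zero_right, Nat.cast_one, Nat.sub_zero,
    List.nil_append, Nat.choose_self] at h
  rw [h, pvRow, List.range_eq_range']

theorem a_eq (m : Nat) : get_coeff ((m : Int) + 1) = pvRow m := by
  induction m with
  | zero =>
    rw [get_coeff]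
    norm_num [pvRow]
  | succ m ih =>
    rw [get_coeff]
    rw [if_neg (by push_cast; omega), if_neg (by push_cast; omega)]
    have hprev : get_coeff ((m + 1 : Nat) + 1 - 1) = pvRow m := by
      rw [show ((m + 1 : Nat) : Int) + 1 - 1 = (m : Int) + 1 from by push_cast; ring, ih]
    simp only [hprev, pvRow_length]
    -- head
    rw [show PySem.List.pyGetD (pvRow m) 0 0 + 0 = (1 : Int) from by
      rw [PySem.List.pyGetD_zero, pvRow_getD_zero]; ring]
    -- tail
    rw [show PySem.List.pyGetD (pvRow m) (-1) 0 = (1 : Int) from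
      PySem.List.pyGetD_neg_one_append_singleton _ _ _]
    -- middle range
    rw [PySem.List.pyRange_one]
    rw [show (((m + 1 : Nat) : Int) - 1).toNat = m from by push_cast; omega]
    rw [List.map_map]
    have hmid : ∀ k ∈ List.range m,
        ((fun i => (-1 : Int) ^ i.toNat *
            (|PySem.List.pyGetD (pvRow m) (i - 1) 0| + |PySem.List.pyGetD (pvRow m) i 0|)) ∘
          (fun k : Nat => (1 : Int) + (k : Int))) k
        = (-1 : Int) ^ (k + 1) * ((m + 1).choose (k + 1) : Int) := by
      intro k hk
      have hkm : k < m := List.mem_range.mp hk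
      simp only [Function.comp]
      rw [show (1 : Int) + (k : Int) - 1 = (k : Int) from by ring,
          show (1 : Int) + (k : Int) = ((k + 1 : Nat) : Int) from by push_cast; ring]
      rw [PySem.List.pyGetD_natCast, PySem.List.pyGetD_natCast]
      rw [pvRow_abs m k (by omega), pvRow_abs m (k + 1) (by omega)]
      rw [show ((k + 1 : Nat) : Int).toNat = k + 1 from by omega]
      rw [show ((m.choose k : Nat) : Int) + ((m.choose (k + 1) : Nat) : Int)
            = (((m + 1).choose (k + 1) : Nat) : Int) from by
        rw [Nat.choose_succ_succ']; push_cast; ring]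
    rw [List.map_congr_left hmid]
    -- assemble against pvRow (m+1)
    rw [pvRow, List.range_succ_eq_map, List.map_cons, List.map_map]
    simp [Function.comp, pow_succ]

-- ===== VERDICT (by name: the statement is the Claim_ definition above) =====
theorem get_coeff_spec : Claim_equal_get_coeff := by
  intro seq_len _ hpre
  have hm : seq_len = ((seq_len - 1).toNat : Int) + 1 := by
    unfold Pre_get_coeff at hpre; omega
  show get_coeff seq_len = get_coeff_alt seq_len
  rw [hm, a_eq, alt_eq]
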